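-- pv_equiv track=rewrite | github.com/miliar/Code_Jam_Webscraper | solutions_python/Problem_182/548.py | solve
-- ===== SOURCE A (Python) =====
-- def solve(grid):
--     numbers = {}
--     for i in grid:
--         for j in i:
--             if j in numbers:
--                 numbers[j] += 1
--             else:
--                 numbers[j] = 1
--
--     answer = []
--     for i in numbers:
--         if numbers[i] % 2 != 0:
--             answer.append(int(i))
--     answer.sort()
--     answer = [str(i) for i in answer]
--     answer = ' '.join(answer)
--
--     return answer
-- ===== SOURCE B (Python) =====
-- def solve(grid):
--     odd = set()
--     for row in grid:
--         for v in row: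
--             if v in odd:
--                 odd.discard(v)
--             else:
--                 odd.add(v)
--     return ' '.join(str(x) for x in sorted(int(v) for v in odd))
-- ===== Notes on version B (the rewrite author's own statement) =====
-- stated objective: idiomatic
-- what changed: Replaces the count dictionary plus a second odd-count filtering pass with a single set whose membership is toggled per element, so after one traversal the set holds exactly the odd-multiplicity values.
import Mathlib
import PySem

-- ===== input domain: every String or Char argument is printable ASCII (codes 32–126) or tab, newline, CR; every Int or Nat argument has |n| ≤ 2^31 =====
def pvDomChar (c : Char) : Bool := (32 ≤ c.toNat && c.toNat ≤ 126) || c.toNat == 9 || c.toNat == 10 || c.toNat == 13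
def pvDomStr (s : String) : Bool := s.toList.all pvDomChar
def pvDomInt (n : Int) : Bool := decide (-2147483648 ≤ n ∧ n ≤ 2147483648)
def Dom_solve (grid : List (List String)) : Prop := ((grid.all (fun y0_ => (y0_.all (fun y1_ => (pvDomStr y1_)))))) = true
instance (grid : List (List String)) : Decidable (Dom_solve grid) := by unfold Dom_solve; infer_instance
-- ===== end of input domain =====

-- B replaces A's count dictionary and second odd-filter pass by one membership-toggled set (idiomatic, same cost).

-- int(s) under Pre_solve (which guarantees the parse succeeds wherever it is performed); exact there.
def pvInt (s : String) : Int := (PySem.Int.ofStr? s).getD 0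

-- ===== PORT A =====
def solve (grid : List (List String)) : String :=
  let numbers : PySem.Dict String Int :=
    grid.foldl (fun numbers i =>
      i.foldl (fun numbers j =>
        if numbers.contains j then numbers.insert j (numbers.getD j 0 + 1)
        else numbers.insert j 1) numbers) PySem.Dict.empty
  let answer : List Int :=
    numbers.keys.foldl (fun answer i =>
      if PySem.Int.mod (numbers.getD i 0) 2 ≠ 0 then answer ++ [pvInt i] else answer) []
  let answer := PySem.List.sorted answer (fun x => x) false
  let answer := answer.map PySem.Int.toStr
  PySem.Str.join " " answer

-- ===== PORT B =====
def solve_alt (grid : List (List String)) : String :=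
  let odd : PySem.Set String :=
    grid.foldl (fun odd row =>
      row.foldl (fun odd v =>
        if PySem.Set.contains odd v then PySem.Set.discard odd v
        else PySem.Set.add odd v) odd) PySem.Set.empty
  PySem.Str.join " " ((PySem.List.sorted (odd.map pvInt) (fun x => x) false).map PySem.Int.toStr)

-- ===== PRECONDITION & SPEC =====
-- Pre_ excludes exactly the grids containing a value of odd multiplicity that int() cannot parse:
-- there the Python A (and B alike) raises ValueError.
def Pre_solve (grid : List (List String)) : Prop :=
  ∀ s ∈ grid.flatten, grid.flatten.count s % 2 = 1 → (PySem.Int.ofStr? s).isSome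
instance (grid : List (List String)) : Decidable (Pre_solve grid) := by unfold Pre_solve; infer_instance

def pvWitness_solve : List (List String) := [["1", "2", "1"], ["-3"]]

def Spec_solve (grid : List (List String)) (out : String) : Prop := out = solve_alt grid
instance (grid : List (List String)) (out : String) : Decidable (Spec_solve grid out) := by unfold Spec_solve; infer_instance

-- ===== CLAIM (what is proved, stated in full; the proofs are below) =====
def Claim_equal_solve : Prop := ∀ (grid : List (List String)), Dom_solve grid → Pre_solve grid → Spec_solve grid (solve grid)

-- ===== LEMMAS AND PROOFS =====

-- A's counting step is Dict.modify _ 0 (·+1)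
theorem stepA_eq_modify (d : PySem.Dict String Int) (j : String) :
    (if d.contains j then d.insert j (d.getD j 0 + 1) else d.insert j 1) = d.modify j 0 (· + 1) := by
  simp only [PySem.Dict.modify, PySem.Dict.getD]
  by_cases h : d.contains j
  · simp [h]
  · have h0 : d.get? j = none := (PySem.Dict.get?_eq_none_iff_contains d j).mpr (by simpa using h)
    simp [h, h0]

-- one toggle step: y's membership flips exactly when y is the toggled element
theorem step_mem (acc : PySem.Set String) (x y : String) :
    (y ∈ (if PySem.Set.contains acc x = true then PySem.Set.discard acc x
          else PySem.Set.add acc x)) ↔ (if x = y then y ∉ acc else y ∈ acc) := by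
  by_cases hm : x ∈ acc
  · rw [if_pos ((PySem.Set.contains_iff acc x).mpr hm)]
    by_cases hxy : x = y
    · subst hxy; simp [PySem.Set.mem_discard, hm]
    · simp only [PySem.Set.mem_discard, if_neg hxy]
      exact ⟨fun h => h.1, fun h => ⟨h, fun hyx => hxy hyx.symm⟩⟩
  · rw [if_neg (by intro hc; exact hm ((PySem.Set.contains_iff acc x).mp hc))]
    by_cases hxy : x = y
    · subst hxy; simp [hm]
    · simp only [PySem.Set.mem_add, if_neg hxy]
      exact ⟨fun h => h.elim id (fun hyx => (hxy hyx.symm).elim), fun h => Or.inl h⟩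

-- membership in B's toggled set: exactly the odd-multiplicity elements (relative to the accumulator)
theorem toggle_mem (xs : List String) (acc : PySem.Set String) (y : String) :
    (y ∈ xs.foldl (fun odd v =>
        if PySem.Set.contains odd v then PySem.Set.discard odd v
        else PySem.Set.add odd v) acc) ↔
      (if List.count y xs % 2 = 0 then y ∈ acc else y ∉ acc) := by
  induction xs generalizing acc with
  | nil => simp
  | cons x t ih =>
    simp only [List.foldl_cons, ih, step_mem, List.count_cons]
    by_cases hxy : x = y <;> by_cases hm : y ∈ acc <;>
      simp [hxy, hm, beq_iff_eq] <;> omega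

-- B's toggled set stays duplicate-free
theorem toggle_nodup (xs : List String) (acc : PySem.Set String) (h : acc.Nodup) :
    (xs.foldl (fun odd v =>
        if PySem.Set.contains odd v then PySem.Set.discard odd v
        else PySem.Set.add odd v) acc).Nodup := by
  induction xs generalizing acc with
  | nil => simpa
  | cons x t ih =>
    simp only [List.foldl_cons]
    refine ih _ ?_
    dsimp only
    split
    · exact PySem.Set.nodup_discard _ _ h
    · exact PySem.Set.nodup_add _ _ h

-- the two string lists (A's odd-count keys, B's toggled set) are permutations of each other
theorem lists_perm (xs : List String) :
    ((PySem.Set.ofList xs).filter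
        (fun i => decide (PySem.Int.mod ((List.count i xs : Int)) 2 ≠ 0))).Perm
      (xs.foldl (fun odd v =>
        if PySem.Set.contains odd v then PySem.Set.discard odd v
        else PySem.Set.add odd v) PySem.Set.empty) := by
  refine (List.perm_ext_iff_of_nodup
      (List.Nodup.filter _ (PySem.Set.nodup_ofList xs))
      (toggle_nodup xs PySem.Set.empty (by simp [PySem.Set.empty]))).mpr ?_
  intro y
  rw [List.mem_filter, toggle_mem]
  by_cases hp : List.count y xs % 2 = 0
  · simp [hp, PySem.Set.empty]
    omega
  · have hy : y ∈ xs := List.count_pos_iff.mp (by omega)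
    simp [hp, PySem.Set.empty, PySem.Set.mem_ofList, hy]
    omega

-- ===== VERDICT (by name: the statement is the Claim_ definition above) =====
theorem solve_spec : Claim_equal_solve := by
  intro grid _ _
  show solve grid = solve_alt grid
  unfold solve solve_alt
  simp only [← List.foldl_flatten]
  rw [PySem.List.foldl_congr_mem _ _ (fun d x => d.modify x 0 (· + 1)) _
      (fun acc x _ => stepA_eq_modify acc x)]
  rw [← PySem.Dict.counter_eq_foldl, PySem.Dict.keys_counter]
  rw [PySem.List.foldl_congr_mem _ _
      (fun answer i => if PySem.Int.mod ((List.count i grid.flatten : Int)) 2 ≠ 0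
        then answer ++ [pvInt i] else answer) _
      (fun acc x _ => by rw [PySem.Dict.getD_counter])]
  rw [PySem.List.foldl_append_ite]
  simp only [List.nil_append]
  rw [PySem.List.sorted_eq_sorted_of_perm _ _ _ (fun a b h => h)
    ((lists_perm grid.flatten).map pvInt)]
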